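-- pv_equiv track=rewrite | github.com/adgarciaar/HackerRankExercises | Miscellaneous/Flipping_bits.py | flippingBits
-- ===== SOURCE A (Python) =====
-- maxDigits = 32
--
-- def decimalToBinary(n):
--
--     accumulated = 0
--     binaryS = ''
--     for i in range( maxDigits-1, -1, -1 ):
--         if( accumulated + 2**i <= n ):
--             binaryS = binaryS + '1'
--             accumulated += 2**i
--         else:
--             binaryS = binaryS + '0'
--
--     return binaryS
--
-- def flippingBits(n):
--
--     initialBinary = None
--
--     if( n == 0 ):
--         initialBinary = '0'
--     elif( n == 1 ):
--         initialBinary = '1'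
--     else:
--         #initialBinary = decimalToBinaryRecursive(n, '')
--         initialBinary = decimalToBinary(n)
--
--     if( len(initialBinary) < maxDigits ):
--         for i in range( maxDigits - len(initialBinary) ):
--             initialBinary = '0' + initialBinary
--
--     newInteger = 0
--     counter = 0
--     for element in reversed(initialBinary):
--
--         number = int(element)
--         if(number == 0):
--             newInteger += 2**counter
--         counter += 1
--
--     return newInteger
-- ===== SOURCE B (Python) =====
-- def flippingBits(n):
--     # One greedy pass: peel bit values 2**31..2**0 off n; every value not taken
--     # goes into the flipped result. No binary string, no padding, no reparse.
--     remaining = n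
--     result = 0
--     for i in range(31, -1, -1):
--         p = 2 ** i
--         if p <= remaining:
--             remaining -= p
--         else:
--             result += p
--     return result
-- ===== Notes on version B (the rewrite author's own statement) =====
-- stated objective: simpler
-- what changed: Replaces the build-binary-string / pad / reparse-and-resum pipeline (with n==0 and n==1 special cases) by a single greedy arithmetic pass that accumulates the complement directly; no strings and no special cases.
import Mathlib
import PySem

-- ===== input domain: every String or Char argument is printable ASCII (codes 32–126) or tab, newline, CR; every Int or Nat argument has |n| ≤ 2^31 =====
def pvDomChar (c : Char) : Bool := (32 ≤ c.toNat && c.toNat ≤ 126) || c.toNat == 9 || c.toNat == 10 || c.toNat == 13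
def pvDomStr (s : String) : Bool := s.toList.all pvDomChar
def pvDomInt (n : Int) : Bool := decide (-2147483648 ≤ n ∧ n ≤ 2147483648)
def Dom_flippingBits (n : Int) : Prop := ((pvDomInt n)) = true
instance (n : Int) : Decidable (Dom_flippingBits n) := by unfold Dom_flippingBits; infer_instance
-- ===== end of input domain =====

-- B replaces A's build-binary-string / pad / reparse pipeline (with its n==0/n==1 special
-- cases) by one greedy arithmetic pass accumulating the complement directly (objective: simpler).

-- ===== PORT A =====
-- loop body of decimalToBinary (i ranges over 31..0, so i.toNat is exact here)
def pvStepBin (n : Int) (st : Int × List Char) (i : Int) : Int × List Char :=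
  if st.1 + 2 ^ i.toNat ≤ n then (st.1 + 2 ^ i.toNat, st.2 ++ ['1']) else (st.1, st.2 ++ ['0'])

def decimalToBinary (n : Int) : List Char :=
  ((PySem.List.pyRange 31 (-1) (-1)).foldl (pvStepBin n) (0, ([] : List Char))).2

-- body of A's second loop: number = int(element) (exact: element is always '0' or '1')
def pvStepSum (st : Int × Nat) (c : Char) : Int × Nat :=
  let number : Int := (PySem.Int.ofChars? [c]).getD 0
  (if number = 0 then st.1 + 2 ^ st.2 else st.1, st.2 + 1)

def flippingBits (n : Int) : Int :=
  let initialBinary : List Char :=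
    if n = 0 then ['0'] else if n = 1 then ['1'] else decimalToBinary n
  let padded : List Char :=
    if initialBinary.length < 32 then
      (List.range (32 - initialBinary.length)).foldl (fun s _ => '0' :: s) initialBinary
    else initialBinary
  (padded.reverse.foldl pvStepSum (0, 0)).1

-- ===== PORT B =====
def pvStepFlip (st : Int × Int) (i : Int) : Int × Int :=
  let p : Int := 2 ^ i.toNat
  if p ≤ st.1 then (st.1 - p, st.2) else (st.1, st.2 + p)

def flippingBits_alt (n : Int) : Int :=
  ((PySem.List.pyRange 31 (-1) (-1)).foldl pvStepFlip (n, 0)).2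

-- ===== PRECONDITION & SPEC =====
def Spec_flippingBits (n : Int) (out : Int) : Prop := out = flippingBits_alt n
instance (n : Int) (out : Int) : Decidable (Spec_flippingBits n out) := by unfold Spec_flippingBits; infer_instance

-- ===== CLAIM (what is proved, stated in full; the proofs are below) =====
def Claim_equal_flippingBits : Prop := ∀ (n : Int), Dom_flippingBits n → Spec_flippingBits n (flippingBits n)

-- ===== LEMMAS AND PROOFS =====

-- [m, m-1, ..., 0]
def pvDown : Nat → List Int
  | 0 => [(0 : Int)]
  | m + 1 => ((m : Int) + 1) :: pvDown m

theorem pvRange_eq_down : PySem.List.pyRange 31 (-1) (-1) = pvDown 31 := by decide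

-- value of A's second loop on a char list, exponent starting at k
def pvZsum : List Char → Nat → Int
  | [], _ => 0
  | c :: t, k => (if ((PySem.Int.ofChars? [c]).getD 0 : Int) = 0 then (2 : Int) ^ k else 0) + pvZsum t (k + 1)

theorem pvChar1 : ((PySem.Int.ofChars? ['1']).getD 0 : Int) = 1 := by decide
theorem pvChar0 : ((PySem.Int.ofChars? ['0']).getD 0 : Int) = 0 := by decide

theorem pvSumFold (l : List Char) : ∀ v k, l.foldl pvStepSum (v, k) = (v + pvZsum l k, k + l.length) := by
  induction l with
  | nil => intro v k; simp [pvZsum]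
  | cons c t ih =>
      intro v k
      simp only [List.foldl_cons, pvStepSum, pvZsum]
      by_cases h : ((PySem.Int.ofChars? [c]).getD 0 : Int) = 0 <;>
        simp [h, ih, List.length_cons] <;>
        first
          | (constructor <;> ring)
          | omega

theorem pvZsum_append (a b : List Char) : ∀ k, pvZsum (a ++ b) k = pvZsum a k + pvZsum b (k + a.length) := by
  induction a with
  | nil => intro k; simp [pvZsum]
  | cons c t ih =>
      intro k
      simp only [List.cons_append, pvZsum, ih (k + 1), List.length_cons]
      have : k + 1 + t.length = k + (t.length + 1) := by omega
      rw [this]; ring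

theorem pvBinFold_append (n : Int) (L : List Int) : ∀ acc (s : List Char),
    L.foldl (pvStepBin n) (acc, s) =
      ((L.foldl (pvStepBin n) (acc, [])).1, s ++ (L.foldl (pvStepBin n) (acc, [])).2) := by
  induction L with
  | nil => intro acc s; simp
  | cons x T ih =>
      intro acc s
      simp only [List.foldl_cons, pvStepBin]
      by_cases h : acc + 2 ^ x.toNat ≤ n <;>
        simp only [h, if_true, if_false] <;>
        rw [ih _ (s ++ [_]), ih _ ([] ++ [_])] <;> simp

theorem pvMain (n : Int) : ∀ m acc res,
    ((pvDown m).foldl (pvStepBin n) (acc, [])).2.length = m + 1 ∧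
    ((pvDown m).foldl pvStepFlip (n - acc, res)).1 = n - ((pvDown m).foldl (pvStepBin n) (acc, [])).1 ∧
    ((pvDown m).foldl pvStepFlip (n - acc, res)).2 =
      res + pvZsum ((pvDown m).foldl (pvStepBin n) (acc, [])).2.reverse 0 := by
  intro m
  induction m with
  | zero =>
      intro acc res
      by_cases h : acc + 1 ≤ n <;>
        · have h' : ((1 : Int) ≤ n - acc) ↔ (acc + 1 ≤ n) := by omega
          simp [pvDown, pvStepBin, pvStepFlip, pvZsum, h, h', pvChar0, pvChar1]
          try omega
  | succ m ih =>
      intro acc res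
      have hcast : (((m : Int) + 1).toNat) = m + 1 := by omega
      simp only [pvDown, List.foldl_cons, pvStepBin, pvStepFlip, hcast]
      by_cases h : acc + 2 ^ (m + 1) ≤ n
      · have h' : ((2 : Int) ^ (m + 1) ≤ n - acc) := by omega
        simp only [h, h', if_true, List.nil_append]
        have hB : n - acc - 2 ^ (m + 1) = n - (acc + 2 ^ (m + 1)) := by ring
        rw [pvBinFold_append n (pvDown m) (acc + 2 ^ (m + 1)) ['1'], hB]
        obtain ⟨hlen, h1, h2⟩ := ih (acc + 2 ^ (m + 1)) res
        refine ⟨by simp [hlen], h1, ?_⟩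
        rw [h2, List.reverse_append, pvZsum_append]
        simp [pvZsum, hlen, pvChar1]
      · have h' : ¬ ((2 : Int) ^ (m + 1) ≤ n - acc) := by omega
        simp only [h, h', if_false, List.nil_append]
        rw [pvBinFold_append n (pvDown m) acc ['0']]
        obtain ⟨hlen, h1, h2⟩ := ih acc (res + 2 ^ (m + 1))
        refine ⟨by simp [hlen], h1, ?_⟩
        rw [h2, List.reverse_append, pvZsum_append]
        simp [pvZsum, hlen, pvChar0]
        ring

-- ===== VERDICT (by name: the statement is the Claim_ definition above) =====
set_option maxRecDepth 8192 in
theorem flippingBits_spec : Claim_equal_flippingBits := by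
  intro n _
  show flippingBits n = flippingBits_alt n
  by_cases h0 : n = 0
  · subst h0; decide
  by_cases h1 : n = 1
  · subst h1; decide
  · obtain ⟨hlen, _, h2⟩ := pvMain n 31 0 0
    have hrange := pvRange_eq_down
    simp only [flippingBits, flippingBits_alt, decimalToBinary, h0, h1, if_false, hrange]
    rw [hlen]
    simp only [lt_irrefl, if_false]
    rw [pvSumFold]
    simpa using h2.symm
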